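-- pv_equiv track=rewrite | github.com/mattpower-ux/greenbuilder_bot_mvp | app/generation.py | summarize_private_usage
-- ===== SOURCE A (Python) =====
-- from typing import Any, Dict, List, Tuple
--
-- def summarize_private_usage(chunks: List[Dict[str, Any]]) -> Tuple[bool, str | None]:
--     private_chunks = [
--         c
--         for c in chunks
--         if c.get("visibility") == "private"
--         and c.get("surface_policy") == "paraphrase"
--     ]
--     if not private_chunks:
--         return False, None
--
--     labels = []
--     seen = set()
--     for chunk in private_chunks:
--         label = (
--             chunk.get("attribution_label")
--             or "Green Builder Media's internal editorial archive"
--         ).strip()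
--         if label not in seen:
--             labels.append(label)
--             seen.add(label)
--
--     joined = "; ".join(labels[:2])
--     return True, joined
-- ===== SOURCE B (Python) =====
-- from typing import Any, Dict, List, Tuple
--
-- DEFAULT_LABEL = "Green Builder Media's internal editorial archive"
--
--
-- def _matches(c: Dict[str, Any]) -> bool:
--     return (
--         c.get("visibility") == "private"
--         and c.get("surface_policy") == "paraphrase"
--     )
--
--
-- def _label(c: Dict[str, Any]) -> str:
--     return (c.get("attribution_label") or DEFAULT_LABEL).strip()
--
--
-- def summarize_private_usage(chunks: List[Dict[str, Any]]) -> Tuple[bool, str | None]: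
--     # Two staged searches instead of filter + dedup: find the first matching
--     # chunk's label, then the first later matching chunk with a DIFFERENT label.
--     it = iter(chunks)
--     for c in it:
--         if _matches(c):
--             first = _label(c)
--             break
--     else:
--         return False, None
--     for c in it:
--         if _matches(c):
--             second = _label(c)
--             if second != first:
--                 return True, first + "; " + second
--     return True, first
-- ===== Notes on version B (the rewrite author's own statement) =====
-- stated objective: alternative
-- what changed: Replaces A's filter comprehension plus dedup loop with a set plus a [:2] slice and join by two staged searches: one loop finds the first matching chunk's label, a second loop over the remaining iterator finds the first later matching chunk with a different label; no set, no label list, no slice is built.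
import Mathlib
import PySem

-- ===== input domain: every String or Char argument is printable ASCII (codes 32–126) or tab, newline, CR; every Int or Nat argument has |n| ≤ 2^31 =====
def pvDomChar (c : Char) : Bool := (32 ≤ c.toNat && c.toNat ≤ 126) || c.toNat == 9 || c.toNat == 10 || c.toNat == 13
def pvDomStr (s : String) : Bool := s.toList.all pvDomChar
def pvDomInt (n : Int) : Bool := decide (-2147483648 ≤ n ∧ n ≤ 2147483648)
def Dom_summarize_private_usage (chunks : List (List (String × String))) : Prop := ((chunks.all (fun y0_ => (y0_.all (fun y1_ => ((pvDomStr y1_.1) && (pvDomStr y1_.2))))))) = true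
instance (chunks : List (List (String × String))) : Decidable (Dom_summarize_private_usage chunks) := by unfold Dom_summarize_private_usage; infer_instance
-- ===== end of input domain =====

-- B replaces A's filter + full dedup loop + [:2] slice by two staged searches
-- (first matching label, then first later matching chunk with a different label);
-- objective: alternative decomposition, same O(n) cost.

-- shared helpers: both Pythons compute the same per-chunk condition and label
-- c.get("visibility") == "private" and c.get("surface_policy") == "paraphrase"
def pvPred (c : List (String × String)) : Bool :=
  ((PySem.Dict.ofList c).get? "visibility" == some "private") &&
  ((PySem.Dict.ofList c).get? "surface_policy" == some "paraphrase")

-- (c.get("attribution_label") or "Green Builder Media's internal editorial archive").strip()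
def pvLabel (c : List (String × String)) : String :=
  PySem.Str.strip
    (match (PySem.Dict.ofList c).get? "attribution_label" with
     | some s => if s == "" then "Green Builder Media's internal editorial archive" else s
     | none => "Green Builder Media's internal editorial archive")

-- ===== PORT A =====
def summarize_private_usage (chunks : List (List (String × String))) : Bool × Option String :=
  let private_chunks := chunks.filter pvPred
  if private_chunks.isEmpty then (false, none)
  else
    let acc := private_chunks.foldl
      (fun (acc : List String × PySem.Set String) chunk =>
        let label := pvLabel chunk
        if PySem.Set.contains acc.2 label then acc
        else (acc.1 ++ [label], PySem.Set.add acc.2 label))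
      ([], PySem.Set.empty)
    -- labels[:2] with a literal nonnegative bound is List.take 2 (exact)
    (true, some (PySem.Str.join "; " (acc.1.take 2)))

-- ===== PORT B =====
-- Source B's first for-loop over the iterator: first matching chunk's label and the not-yet-consumed rest
def spuFirst : List (List (String × String)) → Option (String × List (List (String × String)))
  | [] => none
  | c :: rest => if pvPred c then some (pvLabel c, rest) else spuFirst rest

-- Source B's second for-loop: first later matching chunk whose label differs from `first`
def spuSecond (first : String) : List (List (String × String)) → Option String
  | [] => none
  | c :: rest =>
    if pvPred c then
      let second := pvLabel c
      if second ≠ first then some second else spuSecond first rest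
    else spuSecond first rest

def summarize_private_usage_alt (chunks : List (List (String × String))) : Bool × Option String :=
  match spuFirst chunks with
  | none => (false, none)
  | some (first, rest) =>
    match spuSecond first rest with
    | some second => (true, some (first ++ "; " ++ second))  -- Python str + is concatenation (exact)
    | none => (true, some first)

-- ===== PRECONDITION & SPEC =====
def Spec_summarize_private_usage (chunks : List (List (String × String))) (out : Bool × Option String) : Prop := out = summarize_private_usage_alt chunks
instance (chunks : List (List (String × String))) (out : Bool × Option String) : Decidable (Spec_summarize_private_usage chunks out) := by unfold Spec_summarize_private_usage; infer_instance

-- ===== CLAIM (what is proved, stated in full; the proofs are below) =====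
def Claim_equal_summarize_private_usage : Prop := ∀ (chunks : List (List (String × String))), Dom_summarize_private_usage chunks → Spec_summarize_private_usage chunks (summarize_private_usage chunks)

-- ===== LEMMAS AND PROOFS =====

-- the label-level dedup step of A's fold
def dd (ls : List String) (l : String) : List String :=
  if ls.contains l then ls else ls ++ [l]

-- common normal form both ports are reduced to
def spuT : List String → Bool × Option String
  | [] => (false, none)
  | l1 :: ms =>
    match ms.find? (fun l => !(l == l1)) with
    | none => (true, some l1)
    | some l2 => (true, some (l1 ++ "; " ++ l2))

-- A's fold keeps labels = seen (both start empty and are extended together)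
theorem foldA_pair (xs : List (List (String × String))) (ls : List String) :
    xs.foldl
      (fun (acc : List String × PySem.Set String) chunk =>
        let label := pvLabel chunk
        if PySem.Set.contains acc.2 label then acc
        else (acc.1 ++ [label], PySem.Set.add acc.2 label))
      (ls, ls) = (xs.foldl (fun a c => dd a (pvLabel c)) ls, xs.foldl (fun a c => dd a (pvLabel c)) ls) := by
  induction xs generalizing ls with
  | nil => rfl
  | cons c rest ih =>
    rw [List.foldl_cons, List.foldl_cons]
    convert ih (dd ls (pvLabel c)) using 2
    all_goals
      simp only [PySem.Set.contains, PySem.Set.add, dd]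
      by_cases h : pvLabel c ∈ ls <;> simp [h]

-- the dedup fold only appends
theorem foldDD_prefix (ms : List String) (ls : List String) :
    ∃ t, ms.foldl dd ls = ls ++ t := by
  induction ms generalizing ls with
  | nil => exact ⟨[], by simp⟩
  | cons l rest ih =>
    simp only [List.foldl_cons, dd]
    by_cases h : l ∈ ls
    · simpa [h] using ih ls
    · obtain ⟨t, ht⟩ := ih (ls ++ [l])
      exact ⟨l :: t, by simp [h, ht]⟩

-- first two distinct labels: the dedup-then-take-2 equals a find? of the first differing label
theorem dd_take2 (ms : List String) (l1 : String) :
    (ms.foldl dd [l1]).take 2 =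
      match ms.find? (fun l => !(l == l1)) with
      | none => [l1]
      | some l2 => [l1, l2] := by
  induction ms with
  | nil => simp
  | cons l rest ih =>
    by_cases h : l = l1
    · simp [List.foldl_cons, dd, h, List.find?, ih]
    · obtain ⟨t, ht⟩ := foldDD_prefix rest [l1, l]
      have : dd [l1] l = [l1, l] := by simp [dd, h]
      have hb : (!(l == l1)) = true := by simp [h]
      simp [List.foldl_cons, this, ht, List.find?, hb]

-- A's result in normal form
theorem A_char (chunks : List (List (String × String))) :
    summarize_private_usage chunks = spuT ((chunks.filter pvPred).map pvLabel) := by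
  simp only [summarize_private_usage]
  rw [show (PySem.Set.empty : PySem.Set String) = ([] : List String) from rfl,
      foldA_pair (chunks.filter pvPred) []]
  cases h : chunks.filter pvPred with
  | nil => simp [spuT]
  | cons c rest =>
    simp only [List.isEmpty_cons, List.foldl_cons, List.map_cons, spuT]
    have : dd [] (pvLabel c) = [pvLabel c] := by simp [dd]
    rw [this, ← List.foldl_map (f := pvLabel) (g := dd) (l := rest) (init := [pvLabel c]), dd_take2]
    cases (rest.map pvLabel).find? (fun l => !(l == pvLabel c)) with
    | none =>
      simp [PySem.Str.join]
    | some l2 =>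
      simp only [Bool.false_eq_true, if_false]
      refine congrArg (fun s => (true, some s)) ?_
      simp [PySem.Str.join, PySem.Chars.join_cons_cons, PySem.Chars.join_singleton]
      apply String.toList_injective
      simp

-- the second loop is the find? of the first differing label among later matches
theorem spuSecond_eq (l1 : String) (xs : List (List (String × String))) :
    spuSecond l1 xs = ((xs.filter pvPred).map pvLabel).find? (fun l => !(l == l1)) := by
  induction xs with
  | nil => rfl
  | cons c rest ih =>
    by_cases hp : pvPred c
    · by_cases h : pvLabel c = l1 <;> simp [spuSecond, hp, h, ih]
    · simp [spuSecond, hp, ih]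

-- B's result in the same normal form
theorem B_char (chunks : List (List (String × String))) :
    summarize_private_usage_alt chunks = spuT ((chunks.filter pvPred).map pvLabel) := by
  induction chunks with
  | nil => rfl
  | cons c rest ih =>
    by_cases hp : pvPred c
    · simp only [summarize_private_usage_alt, spuFirst, hp, if_true,
        List.filter_cons_of_pos hp, List.map_cons, spuT, spuSecond_eq]
      cases (((rest.filter pvPred).map pvLabel).find? (fun l => !(l == pvLabel c))) <;> rfl
    · simpa [summarize_private_usage_alt, spuFirst, hp, List.filter_cons_of_neg hp] using ih

-- ===== VERDICT (by name: the statement is the Claim_ definition above) =====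
theorem summarize_private_usage_spec : Claim_equal_summarize_private_usage := by
  intro chunks _
  unfold Spec_summarize_private_usage
  rw [A_char, B_char]
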